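-- pv_equiv track=rewrite | github.com/MukundaJ/APS | Problems/Delivery Man/delivery_man.py | delivery_man_optimized_1
-- ===== SOURCE A (Python) =====
-- def delivery_man_optimized_1(A, B, X, Y, N):
--     # Find the differences in tips, and reverse sort them.
--     diff = sorted([a - b for a, b in zip(A, B)], reverse=True)
--     # Consider the max tips = sum of any one of Andy's or Bob's tips.
--     max_tips = sum(B)
--     # Some of the tips could have been greater if the other one took the order.
--     # Find where the diff was the maximum, and the other one would have made a
--     # positive contribution.
--     for i in range(X):
--         if diff[i] > 0:
--             max_tips += diff[i]
--         else:
--             break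
--     # return the maximum tip.
--     return max_tips
-- ===== SOURCE B (Python) =====
-- def delivery_man_optimized_1(A, B, X, Y, N):
--     # Collect only the positive differences; select the sum of the k largest
--     # by quickselect-style partitioning instead of fully sorting.
--     pos = [a - b for a, b in zip(A, B) if a - b > 0]
--     k = X if X < len(pos) else len(pos)
--     total = sum(B)
--     if k > 0:
--         total += _sum_largest(pos, k)
--     return total
--
--
-- def _sum_largest(xs, k):
--     # sum of the k largest elements of xs, assuming 0 < k <= len(xs)
--     if len(xs) <= k:
--         return sum(xs)
--     pivot = xs[0]
--     hi = [x for x in xs if x > pivot]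
--     if k <= len(hi):
--         return _sum_largest(hi, k)
--     eq = [x for x in xs if x == pivot]
--     if k <= len(hi) + len(eq):
--         return sum(hi) + (k - len(hi)) * pivot
--     lo = [x for x in xs if x < pivot]
--     return sum(hi) + sum(eq) + _sum_largest(lo, k - len(hi) - len(eq))
-- ===== Notes on version B (the rewrite author's own statement) =====
-- stated objective: faster
-- what changed: B filters the positive A-B differences and sums the k largest by quickselect-style three-way partitioning instead of fully reverse-sorting all differences and walking the prefix with a break.
import Mathlib
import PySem

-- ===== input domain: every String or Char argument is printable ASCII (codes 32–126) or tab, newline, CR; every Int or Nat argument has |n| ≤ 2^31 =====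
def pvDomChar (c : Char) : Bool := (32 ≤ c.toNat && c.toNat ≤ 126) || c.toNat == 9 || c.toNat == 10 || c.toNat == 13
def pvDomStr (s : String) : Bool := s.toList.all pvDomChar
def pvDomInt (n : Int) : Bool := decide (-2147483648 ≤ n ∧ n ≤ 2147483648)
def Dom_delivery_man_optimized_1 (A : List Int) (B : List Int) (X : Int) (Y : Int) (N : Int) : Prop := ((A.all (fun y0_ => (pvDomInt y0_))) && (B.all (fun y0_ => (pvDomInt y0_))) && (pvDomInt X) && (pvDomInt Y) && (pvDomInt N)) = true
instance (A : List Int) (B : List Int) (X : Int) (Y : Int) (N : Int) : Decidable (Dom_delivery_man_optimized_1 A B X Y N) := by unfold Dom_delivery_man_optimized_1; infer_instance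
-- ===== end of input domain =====

-- B replaces A's full reverse-sort + prefix walk by a quickselect-style sum of the k
-- largest positive differences (objective: faster; measured faster in a timing run).

-- ===== PORT A =====
-- 'for i in range(X): if diff[i] > 0: max_tips += diff[i] else: break'
-- (on an out-of-range index Python raises IndexError — those inputs are excluded by
-- Pre_; the port returns 0 there)
def pvLoopA (diff : List Int) : List Int → Int → Int
  | [], acc => acc
  | i :: rest, acc =>
    match PySem.List.pyGet? diff i with
    | none => 0
    | some d => if d > 0 then pvLoopA diff rest (acc + d) else acc

def delivery_man_optimized_1 (A : List Int) (B : List Int) (X : Int) (Y : Int) (N : Int) : Int :=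
  let diff := PySem.List.sorted (List.zipWith (fun a b => a - b) A B) (fun x => x) true
  let max_tips := B.sum
  pvLoopA diff (PySem.List.pyRange 0 X 1) max_tips

-- ===== PORT B =====
-- _sum_largest(xs, k): sum of the k largest elements of xs (callers ensure 0 < k ≤ len xs;
-- the [] branch is Python's IndexError on xs[0], unreachable from those callers)
def pvSumLargest (xs : List Int) (k : Int) : Int :=
  if (xs.length : Int) ≤ k then xs.sum
  else
    match xs with
    | [] => 0
    | pivot :: rest =>
      let hi := (pivot :: rest).filter (fun x => pivot < x)
      if k ≤ (hi.length : Int) then pvSumLargest hi k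
      else
        let eq := (pivot :: rest).filter (fun x => x = pivot)
        if k ≤ (hi.length : Int) + (eq.length : Int) then
          hi.sum + (k - (hi.length : Int)) * pivot
        else
          let lo := (pivot :: rest).filter (fun x => x < pivot)
          hi.sum + eq.sum + pvSumLargest lo (k - (hi.length : Int) - (eq.length : Int))
termination_by xs.length
decreasing_by
  · exact List.length_filter_lt_length_iff_exists.mpr ⟨pivot, by simp, by simp⟩
  · exact List.length_filter_lt_length_iff_exists.mpr ⟨pivot, by simp, by simp⟩

def delivery_man_optimized_1_alt (A : List Int) (B : List Int) (X : Int) (Y : Int) (N : Int) : Int :=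
  let pos := (List.zipWith (fun a b => a - b) A B).filter (fun d => 0 < d)
  let k := if X < (pos.length : Int) then X else (pos.length : Int)
  let total := B.sum
  if 0 < k then total + pvSumLargest pos k else total

-- ===== PRECONDITION & SPEC =====
-- Pre_ excludes exactly the inputs on which Python A raises IndexError: X exceeds the
-- number of zipped pairs while every difference a-b is positive (the loop never breaks).
def Pre_delivery_man_optimized_1 (A : List Int) (B : List Int) (X : Int) (Y : Int) (N : Int) : Prop :=
  X ≤ ((min A.length B.length : Nat) : Int) ∨ ∃ d ∈ List.zipWith (fun a b => a - b) A B, d ≤ 0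
instance (A : List Int) (B : List Int) (X : Int) (Y : Int) (N : Int) : Decidable (Pre_delivery_man_optimized_1 A B X Y N) := by unfold Pre_delivery_man_optimized_1; infer_instance

def pvWitness_delivery_man_optimized_1 : List Int × List Int × Int × Int × Int := ([3, 1], [1, 2], 1, 0, 2)

def Spec_delivery_man_optimized_1 (A : List Int) (B : List Int) (X : Int) (Y : Int) (N : Int) (out : Int) : Prop := out = delivery_man_optimized_1_alt A B X Y N
instance (A : List Int) (B : List Int) (X : Int) (Y : Int) (N : Int) (out : Int) : Decidable (Spec_delivery_man_optimized_1 A B X Y N out) := by unfold Spec_delivery_man_optimized_1; infer_instance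

-- ===== CLAIM (what is proved, stated in full; the proofs are below) =====
def Claim_equal_delivery_man_optimized_1 : Prop := ∀ (A : List Int) (B : List Int) (X : Int) (Y : Int) (N : Int), Dom_delivery_man_optimized_1 A B X Y N → Pre_delivery_man_optimized_1 A B X Y N → Spec_delivery_man_optimized_1 A B X Y N (delivery_man_optimized_1 A B X Y N)

-- ===== LEMMAS AND PROOFS =====

-- take commutes with takeWhile (prefix of a prefix)
theorem pv_takeWhile_take (p : Int → Bool) (n : Nat) (l : List Int) :
    (l.take n).takeWhile p = (l.takeWhile p).take n := by
  induction l generalizing n with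
  | nil => simp
  | cons a t ih =>
    cases n with
    | zero => simp
    | succ m => by_cases h : p a <;> simp [h, ih]

-- on a descending list, the positive prefix is all the positives
theorem pv_takeWhile_pos_eq_filter (l : List Int) (h : l.Pairwise (fun a b => b ≤ a)) :
    l.takeWhile (fun d => decide (0 < d)) = l.filter (fun d => decide (0 < d)) := by
  induction l with
  | nil => rfl
  | cons a t ih =>
    rcases List.pairwise_cons.mp h with ⟨ha, ht⟩
    by_cases h0 : 0 < a
    · simp [h0, ih ht]
    · have : t.filter (fun d => decide (0 < d)) = [] := by
        rw [List.filter_eq_nil_iff]; intro x hx; simp; have := ha x hx; omega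
      simp [h0, this]

-- filtering the positives commutes with the descending sort
theorem pv_filter_sorted (p : Int → Bool) (xs : List Int) :
    (PySem.List.sorted xs (fun x => x) true).filter p
      = PySem.List.sorted (xs.filter p) (fun x => x) true := by
  apply List.Perm.eq_of_pairwise (le := fun a b : Int => b ≤ a)
  · intro a b _ _ h1 h2; omega
  · exact (PySem.List.sorted_pairwise_rev xs (fun x => x)).filter _
  · exact PySem.List.sorted_pairwise_rev (xs.filter p) (fun x => x)
  · exact ((PySem.List.sorted_perm xs (fun x => x) true).filter p).trans
      (PySem.List.sorted_perm (xs.filter p) (fun x => x) true).symm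

theorem pv_partition_perm (pivot : Int) (xs : List Int) :
    (xs.filter (fun x => pivot < x) ++ (xs.filter (fun x => x = pivot)
      ++ xs.filter (fun x => x < pivot))).Perm xs := by
  have h1 := List.filter_append_perm (fun x => decide (pivot < x)) xs
  have h2 := List.filter_append_perm (fun x => decide (x = pivot))
      (xs.filter (fun x => !decide (pivot < x)))
  rw [List.filter_filter, List.filter_filter] at h2
  have e1 : xs.filter (fun a => decide (a = pivot) && !decide (pivot < a))
      = xs.filter (fun x => x = pivot) := by
    apply List.filter_congr; intro x _
    by_cases h : x = pivot <;> simp [h]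
  have e2 : xs.filter (fun a => !decide (a = pivot) && !decide (pivot < a))
      = xs.filter (fun x => x < pivot) := by
    apply List.filter_congr; intro x _
    by_cases h : x < pivot <;> [skip; by_cases h' : x = pivot] <;> simp [h] <;> omega
  rw [e1, e2] at h2
  exact (List.Perm.append_left _ h2).trans h1

-- sorted(xs, reverse=True) splits as sorted hi ++ eq ++ sorted lo

theorem pv_sorted_partition (pivot : Int) (xs : List Int) :
    PySem.List.sorted xs (fun x => x) true
      = PySem.List.sorted (xs.filter (fun x => pivot < x)) (fun x => x) true
        ++ (xs.filter (fun x => x = pivot)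
        ++ PySem.List.sorted (xs.filter (fun x => x < pivot)) (fun x => x) true) := by
  apply List.Perm.eq_of_pairwise (le := fun a b : Int => b ≤ a)
  · intro a b _ _ h1 h2; omega
  · exact PySem.List.sorted_pairwise_rev xs (fun x => x)
  · rw [List.pairwise_append]
    refine ⟨PySem.List.sorted_pairwise_rev _ _, ?_, ?_⟩
    · rw [List.pairwise_append]
      refine ⟨?_, PySem.List.sorted_pairwise_rev _ _, ?_⟩
      · apply List.pairwise_of_forall_mem_list
        intro a ha b hb
        rw [List.mem_filter] at ha hb; simp at ha hb; omega
      · intro a ha b hb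
        rw [List.mem_filter] at ha
        rw [PySem.List.mem_sorted, List.mem_filter] at hb
        simp at ha hb; omega
    · intro a ha b hb
      rw [PySem.List.mem_sorted, List.mem_filter] at ha
      rcases List.mem_append.mp hb with hb | hb
      · rw [List.mem_filter] at hb; simp at ha hb; omega
      · rw [PySem.List.mem_sorted, List.mem_filter] at hb; simp at ha hb; omega
  · refine (PySem.List.sorted_perm _ _ _).trans ?_
    exact (pv_partition_perm pivot xs).symm.trans
      (List.Perm.append (PySem.List.sorted_perm _ _ _).symm
        (List.Perm.append_left _ (PySem.List.sorted_perm _ _ _).symm))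

theorem pv_sum_take_const (pivot : Int) : ∀ (l : List Int) (m : Nat),
    (∀ x ∈ l, x = pivot) → m ≤ l.length → (l.take m).sum = m * pivot
  | l, 0, _, _ => by simp
  | a :: t, m + 1, h, hm => by
    have ha : a = pivot := h a (by simp)
    have := pv_sum_take_const pivot t m (fun x hx => h x (by simp [hx])) (by simpa using hm)
    simp [this, ha]; ring
  | [], m + 1, _, hm => by simp at hm

theorem pvSumLargest_spec (xs : List Int) (k : Int) (hk : 0 < k) :
    pvSumLargest xs k = ((PySem.List.sorted xs (fun x => x) true).take k.toNat).sum := by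
  rw [pvSumLargest.eq_def]
  split
  · next h =>
    rw [List.take_of_length_le (by rw [PySem.List.length_sorted]; omega)]
    exact ((PySem.List.sorted_perm xs (fun x => x) true).sum_eq).symm
  · next h =>
    match xs with
    | [] => simp at h; omega
    | pivot :: rest =>
      simp only []
      rw [pv_sorted_partition pivot (pivot :: rest)]
      set hi := (pivot :: rest).filter (fun x => pivot < x) with hhi
      set eq := (pivot :: rest).filter (fun x => x = pivot) with heq
      set lo := (pivot :: rest).filter (fun x => x < pivot) with hlo
      have hmemeq : ∀ x ∈ eq, x = pivot := by
        intro x hx; rw [heq, List.mem_filter] at hx; simpa using hx.2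
      split
      · next h1 =>
        rw [List.take_append_of_le_length (by rw [PySem.List.length_sorted]; omega)]
        exact pvSumLargest_spec hi k hk
      · next h1 =>
        have hhik : hi.length ≤ k.toNat := by omega
        split
        · next h2 =>
          rw [List.take_append, List.take_of_length_le (by rw [PySem.List.length_sorted]; omega),
            List.sum_append, PySem.List.length_sorted,
            List.take_append_of_le_length (by omega),
            (PySem.List.sorted_perm hi (fun x => x) true).sum_eq,
            pv_sum_take_const pivot eq (k.toNat - hi.length) hmemeq (by omega)]
          have : ((k.toNat - hi.length : Nat) : Int) = k - hi.length := by omega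
          rw [this]
        · next h2 =>
          rw [List.take_append, List.take_of_length_le (by rw [PySem.List.length_sorted]; omega),
            List.sum_append, PySem.List.length_sorted, List.take_append,
            List.take_of_length_le (by omega), List.sum_append,
            (PySem.List.sorted_perm hi (fun x => x) true).sum_eq,
            pvSumLargest_spec lo (k - hi.length - eq.length) (by omega)]
          have : (k - (hi.length : Int) - eq.length).toNat = k.toNat - hi.length - eq.length := by omega
          rw [this]
          ring
termination_by xs.length
decreasing_by
  · exact List.length_filter_lt_length_iff_exists.mpr ⟨pivot, by simp, by simp⟩
  · exact List.length_filter_lt_length_iff_exists.mpr ⟨pivot, by simp, by simp⟩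

theorem pv_loop_eq (s : List Int) : ∀ (m i : Nat) (acc : Int),
    (i + m ≤ s.length ∨ ∃ d ∈ s.drop i, d ≤ 0) →
    pvLoopA s (PySem.List.pyRange i (i + (m : Int)) 1) acc
      = acc + (((s.drop i).take m).takeWhile (fun d => decide (0 < d))).sum
  | 0, i, acc, _ => by
    simp only [Nat.cast_zero, add_zero, PySem.List.pyRange_one_eq_nil le_rfl]
    simp [pvLoopA]
  | m + 1, i, acc, h => by
    rw [PySem.List.pyRange_one_cons (by push_cast; omega)]
    cases hd : s.drop i with
    | nil =>
      exfalso
      rcases h with h | ⟨d, hdm, _⟩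
      · rw [List.drop_eq_nil_iff] at hd; omega
      · rw [hd] at hdm; simp at hdm
    | cons d t =>
      have hget : PySem.List.pyGet? s (i : Int) = some d := by
        rw [PySem.List.pyGet?_natCast, ← List.head?_drop, hd]; rfl
      by_cases h0 : d > 0
      · have hrec := pv_loop_eq s m (i + 1) (acc + d) (by
          rcases h with h | ⟨d', hdm, hd'⟩
          · left; omega
          · right
            refine ⟨d', ?_, hd'⟩
            have ht : s.drop (i + 1) = t := by
              rw [← List.drop_drop (j := i) (i := 1), hd]; rfl
            rw [ht]
            rw [hd] at hdm
            rcases List.mem_cons.mp hdm with rfl | hm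
            · omega
            · exact hm)
        have ht : s.drop (i + 1) = t := by
          rw [← List.drop_drop (j := i) (i := 1), hd]; rfl
        simp only [pvLoopA, hget]
        rw [if_pos h0, show ((i : Int) + 1) = ((i + 1 : Nat) : Int) by push_cast; ring,
          show (i : Int) + ((m + 1 : Nat) : Int) = ((i + 1 : Nat) : Int) + (m : Int) by push_cast; ring,
          hrec, ht]
        rw [List.take_succ_cons, List.takeWhile_cons_of_pos (by simpa using h0), List.sum_cons]
        ring
      · simp only [pvLoopA, hget]
        rw [if_neg h0, List.take_succ_cons, List.takeWhile_cons_of_neg (by simpa using h0)]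
        simp

-- ===== VERDICT (by name: the statement is the Claim_ definition above) =====
theorem delivery_man_optimized_1_spec : Claim_equal_delivery_man_optimized_1 := by
  intro A B X Y N _ hpre
  unfold Spec_delivery_man_optimized_1 delivery_man_optimized_1 delivery_man_optimized_1_alt
  simp only []
  set diffs := List.zipWith (fun a b => a - b) A B with hdiffs
  set s := PySem.List.sorted diffs (fun x => x) true with hs
  set posL := diffs.filter (fun d => decide (0 < d)) with hpos
  have hlen_s : s.length = diffs.length := PySem.List.length_sorted _ _ _
  have hlen_d : diffs.length = min A.length B.length := List.length_zipWith
  have hsorted_eq : s.filter (fun d => decide (0 < d))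
      = PySem.List.sorted posL (fun x => x) true := pv_filter_sorted _ diffs
  by_cases hX : 0 < X
  · -- the loop runs; A = B.sum + sum of the positive prefix of the first X of s
    have hA : pvLoopA s (PySem.List.pyRange 0 X 1) B.sum
        = B.sum + (((PySem.List.sorted posL (fun x => x) true).take X.toNat)).sum := by
      have h0X : ((0 : Nat) : Int) = 0 := by norm_num
      have hXm : X = ((X.toNat : Nat) : Int) := by omega
      have := pv_loop_eq s X.toNat 0 B.sum (by
        rcases hpre with hle | ⟨d, hdm, hd⟩
        · left; omega
        · right
          exact ⟨d, by rw [List.drop_zero, hs, PySem.List.mem_sorted]; exact hdm, hd⟩)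
      rw [h0X, ← hXm] at this
      simp only [List.drop_zero, zero_add] at this
      rw [this, pv_takeWhile_take,
        pv_takeWhile_pos_eq_filter s (PySem.List.sorted_pairwise_rev diffs (fun x => x)),
        hsorted_eq]
    rw [hA]
    -- now the B side
    by_cases hk : X < (posL.length : Int)
    · rw [if_pos hk, if_pos (by omega : (0:Int) < X),
        pvSumLargest_spec posL X hX]
    · rw [if_neg hk]
      by_cases hk0 : (0 : Int) < (posL.length : Int)
      · rw [if_pos hk0, pvSumLargest_spec posL posL.length (by omega)]
        congr 1
        rw [List.take_of_length_le (by rw [PySem.List.length_sorted]; omega),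
          List.take_of_length_le (by rw [PySem.List.length_sorted]; omega)]
      · rw [if_neg hk0]
        have : posL = [] := by
          cases h : posL with
          | nil => rfl
          | cons a t => rw [h] at hk0; simp at hk0
        rw [this]
        have : PySem.List.sorted ([] : List Int) (fun x => x) true = [] := rfl
        rw [this]
        simp
  · -- X ≤ 0: the range is empty and B adds nothing
    have hknot : ¬ (0 : Int) < (if X < (posL.length : Int) then X else (posL.length : Int)) := by
      split <;> omega
    rw [PySem.List.pyRange_one_eq_nil (by omega), if_neg hknot]
    rfl
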